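-- pv_equiv track=rewrite | github.com/YYYChang/Basic-Algorithms | 03_06_max_num_p.py | max_num_pair
-- ===== SOURCE A (Python) =====
-- def max_num_pair(num) :
--     sum = 0
--     intlst = []
--     for i in range(1,num+1):
--         if sum + i + (i+1) <= num :
--             intlst.append(i)
--             sum += i
--         else :
--             last = num - sum
--             if last > 0 :
--                 intlst.append(num-sum)
--             break
--     return intlst
-- ===== SOURCE B (Python) =====
-- def max_num_pair(num):
--     # Binary search for the largest m with m*(m+1)//2 <= num, then build the
--     # answer directly: [1..m-1] followed by the remainder num - T_{m-1}.
--     if num < 1: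
--         return []
--     lo, hi = 1, num
--     while lo < hi:
--         mid = (lo + hi + 1) // 2
--         if mid * (mid + 1) // 2 <= num:
--             lo = mid
--         else:
--             hi = mid - 1
--     k = lo - 1
--     return list(range(1, k + 1)) + [num - k * (k + 1) // 2]
-- ===== Notes on version B (the rewrite author's own statement) =====
-- stated objective: alternative
-- what changed: Replaces the greedy accumulate-and-append loop with a binary search for the largest m with m*(m+1)//2 <= num, then builds the result directly as range(1, m) plus the closed-form remainder.
import Mathlib
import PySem

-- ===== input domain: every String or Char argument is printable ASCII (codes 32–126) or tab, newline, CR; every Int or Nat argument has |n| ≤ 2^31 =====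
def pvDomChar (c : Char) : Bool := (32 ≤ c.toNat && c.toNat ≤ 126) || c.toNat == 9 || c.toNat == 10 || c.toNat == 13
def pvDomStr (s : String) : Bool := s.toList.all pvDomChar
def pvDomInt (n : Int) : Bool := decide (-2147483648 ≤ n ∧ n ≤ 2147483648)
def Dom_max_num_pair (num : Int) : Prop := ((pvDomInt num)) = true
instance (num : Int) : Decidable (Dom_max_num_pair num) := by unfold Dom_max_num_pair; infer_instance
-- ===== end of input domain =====

-- B replaces A's greedy accumulate-and-append loop by a binary search for the largest m
-- with m*(m+1)//2 ≤ num plus a direct range build (objective: alternative algorithm).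

-- ===== PORT A =====
-- the for-loop of A, with early break (else branch) and running sum
def maxNumPairLoop (num : Int) : List Int → Int → List Int → List Int
  | [], _, intlst => intlst
  | i :: rest, sum, intlst =>
    if sum + i + (i + 1) ≤ num then
      maxNumPairLoop num rest (sum + i) (intlst ++ [i])
    else
      if num - sum > 0 then intlst ++ [num - sum] else intlst

def max_num_pair (num : Int) : List Int :=
  maxNumPairLoop num (PySem.List.pyRange 1 (num + 1) 1) 0 []

-- ===== PORT B =====
-- the while-loop of B: binary search for the largest m with m*(m+1)//2 <= num
def bsearchTri (num lo hi : Int) : Int :=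
  if h : lo < hi then
    let mid := PySem.Int.floordiv (lo + hi + 1) 2
    if PySem.Int.floordiv (mid * (mid + 1)) 2 ≤ num then bsearchTri num mid hi
    else bsearchTri num lo (mid - 1)
  else lo
termination_by (hi - lo).toNat
decreasing_by
  · have hb := PySem.Int.floordiv_two_mid_bounds (lo := lo + 1) (hi := hi) (by omega)
    have : lo + 1 + hi = lo + hi + 1 := by ring
    rw [this] at hb
    omega
  · have hb := PySem.Int.floordiv_two_mid_bounds (lo := lo + 1) (hi := hi) (by omega)
    have : lo + 1 + hi = lo + hi + 1 := by ring
    rw [this] at hb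
    omega

def max_num_pair_alt (num : Int) : List Int :=
  if num < 1 then []
  else
    let k := bsearchTri num 1 num - 1
    PySem.List.pyRange 1 (k + 1) 1 ++ [num - PySem.Int.floordiv (k * (k + 1)) 2]

-- ===== PRECONDITION & SPEC =====
def Spec_max_num_pair (num : Int) (out : List Int) : Prop := out = max_num_pair_alt num
instance (num : Int) (out : List Int) : Decidable (Spec_max_num_pair num out) := by unfold Spec_max_num_pair; infer_instance

-- ===== CLAIM (what is proved, stated in full; the proofs are below) =====
def Claim_equal_max_num_pair : Prop := ∀ (num : Int), Dom_max_num_pair num → Spec_max_num_pair num (max_num_pair num)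

-- ===== LEMMAS AND PROOFS =====

-- floordiv of an even product of consecutive integers is exact halving
theorem floordiv_consec (k : Int) :
    2 * PySem.Int.floordiv (k * (k + 1)) 2 = k * (k + 1) := by
  have he : 2 ∣ k * (k + 1) := (Int.even_mul_succ_self k).two_dvd
  obtain ⟨t, ht⟩ := he
  rw [ht, PySem.Int.floordiv_eq_ediv_of_pos (by omega)]
  omega

-- binary-search invariant: from a bracketing interval the search returns the largest m
-- with m(m+1) ≤ 2*num
theorem bsearchTri_spec (num : Int) : ∀ lo hi : Int, lo ≤ hi → 1 ≤ lo →
    lo * (lo + 1) ≤ 2 * num → 2 * num < (hi + 1) * (hi + 2) →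
    1 ≤ bsearchTri num lo hi ∧
      bsearchTri num lo hi * (bsearchTri num lo hi + 1) ≤ 2 * num ∧
      2 * num < (bsearchTri num lo hi + 1) * (bsearchTri num lo hi + 2) := by
  intro lo hi
  induction hlh : (hi - lo).toNat using Nat.strong_induction_on generalizing lo hi with
  | _ n ih =>
    intro hle h1 hlow hhigh
    rw [bsearchTri]
    by_cases h : lo < hi
    · simp only [h, dite_true]
      have hb := PySem.Int.floordiv_two_mid_bounds (lo := lo + 1) (hi := hi) (by omega)
      have heq : lo + 1 + hi = lo + hi + 1 := by ring
      rw [heq] at hb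
      set mid := PySem.Int.floordiv (lo + hi + 1) 2 with hmid
      have hfd := floordiv_consec mid
      by_cases hc : PySem.Int.floordiv (mid * (mid + 1)) 2 ≤ num
      · simp only [hc, ite_true]
        exact ih ((hi - mid).toNat) (by omega) mid hi rfl (by omega) (by omega)
          (by omega) hhigh
      · simp only [hc, ite_false]
        have : 2 * num < mid * (mid + 1) := by omega
        refine ih ((mid - 1 - lo).toNat) (by omega) lo (mid - 1) rfl (by omega) h1 hlow ?_
        have : mid - 1 + 1 = mid := by ring
        rw [this]
        have : mid - 1 + 2 = mid + 1 := by ring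
        rw [this]
        exact ‹2 * num < mid * (mid + 1)›
    · simp only [h, dite_false]
      have : lo = hi := by omega
      subst this
      exact ⟨h1, hlow, hhigh⟩

-- A's loop, characterised: starting at index j with sum = T_{j-1}, while the bracketing
-- k (with T_{k+1} ≤ num < T_{k+2}) lies ahead, the loop appends j..k and then num - T_k
theorem maxNumPairLoop_spec (num : Int) : ∀ j s k : Int, ∀ acc : List Int,
    1 ≤ j → 2 * s = (j - 1) * j → j * (j + 1) ≤ 2 * num →
    j ≤ k + 1 → (k + 1) * (k + 2) ≤ 2 * num → 2 * num < (k + 2) * (k + 3) →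
    maxNumPairLoop num (PySem.List.pyRange j (num + 1) 1) s acc =
      acc ++ (PySem.List.pyRange j (k + 1) 1 ++ [num - PySem.Int.floordiv (k * (k + 1)) 2]) := by
  intro j s k acc
  induction hm : (k + 1 - j).toNat using Nat.strong_induction_on generalizing j s acc with
  | _ n ih =>
    intro hj hs hTj hjk hTk1 hTk2
    have hjnum : j ≤ num := by nlinarith
    rw [PySem.List.pyRange_one_cons (by omega)]
    rw [maxNumPairLoop]
    by_cases hc : s + j + (j + 1) ≤ num
    · -- condition ⟺ (j+1)(j+2) ≤ 2 num
      have hTj1 : (j + 1) * (j + 2) ≤ 2 * num := by nlinarith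
      have hjk' : j ≤ k := by
        rcases lt_or_ge j (k + 1) with h | h
        · omega
        · have : j = k + 1 := by omega
          subst this
          nlinarith
      simp only [hc, ite_true]
      rw [ih ((k + 1 - (j + 1)).toNat) (by omega) (j + 1) (s + j) (acc ++ [j]) rfl
        (by omega) (by linear_combination hs) (by linarith [hTj1]) (by omega) hTk1 hTk2]
      rw [PySem.List.pyRange_one_cons (a := j) (b := k + 1) (by omega)]
      simp
    · -- loop exits: j = k + 1
      have h2n : 2 * num < (j + 1) * (j + 2) := by nlinarith
      have hjk2 : j = k + 1 := by
        rcases lt_or_ge k j with h | h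
        · omega
        · -- k ≥ j, so (k+1)(k+2) ≥ (j+1)(j+2) > 2 num, contradiction
          exfalso
          have h1 : (j + 1) * (j + 2) ≤ (k + 1) * (k + 2) := by nlinarith
          linarith
      subst hjk2
      have hfd := floordiv_consec k
      have hs' : s = PySem.Int.floordiv (k * (k + 1)) 2 := by
        have : (k + 1 - 1) * (k + 1) = k * (k + 1) := by ring
        rw [this] at hs
        omega
      have hpos : num - s > 0 := by nlinarith
      simp only [hc, ite_false, hpos, ite_true]
      rw [PySem.List.pyRange_one_eq_nil (by omega)]
      simp [hs']

-- ===== VERDICT (by name: the statement is the Claim_ definition above) =====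
theorem max_num_pair_spec : Claim_equal_max_num_pair := by
  unfold Claim_equal_max_num_pair
  intro num _
  unfold Spec_max_num_pair max_num_pair max_num_pair_alt
  by_cases h : num < 1
  · simp only [h, ite_true]
    rw [PySem.List.pyRange_one_eq_nil (by omega)]
    rfl
  · simp only [h, ite_false]
    have h1 : 1 ≤ num := by omega
    obtain ⟨hm1, hmlow, hmhigh⟩ := bsearchTri_spec num 1 num h1 le_rfl (by nlinarith)
      (by nlinarith)
    set m := bsearchTri num 1 num with hm
    have := maxNumPairLoop_spec num 1 0 (m - 1) [] le_rfl (by ring) (by omega)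
      (by omega) (by have : m - 1 + 1 = m := by ring
                     have : (m - 1 + 1) * (m - 1 + 2) = m * (m + 1) := by ring
                     omega)
      (by have : (m - 1 + 2) * (m - 1 + 3) = (m + 1) * (m + 2) := by ring
          omega)
    rw [this]
    simp
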